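-- pv_equiv track=rewrite | github.com/pypi-data/pypi-mirror-362 | packages/remap-badblocks/remap_badblocks-0.7-py3-none-any.whl/remap_badblocks/src/badblocks/_compute_good_ranges.py | compute_good_ranges
-- ===== SOURCE A (Python) =====
-- from typing import Generator, Iterable
--
-- def compute_good_ranges(
--     bad_sectors: Iterable[int], available_range: tuple[int, int]
-- ) -> Generator[tuple[int, int], None, None]:
--     """
--     Compute good sector ranges, excluding bad sectors.
--     available_range is expected to be a range that is right-open
--     result is a range that is right-open
--     """
--     bad_sectors = sorted(set(bad_sectors))  # Ensure bad_sectors is sorted and unique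
--     current_start = available_range[0]
--     last_sector = available_range[1] - 1
--
--     for bad_sector in bad_sectors:
--         if bad_sector > last_sector:
--             break
--         if current_start < bad_sector:
--             yield (current_start, bad_sector)
--         current_start = bad_sector + 1
--
--     if current_start <= last_sector:
--         yield (current_start, last_sector + 1)
-- ===== SOURCE B (Python) =====
-- def compute_good_ranges(bad_sectors, available_range):
--     """Divide and conquer: pick a pivot bad sector, recurse on the sub-ranges
--     left and right of it; no sorting of the bad sectors is ever done."""
--     def solve(bads, lo, hi):
--         last = hi - 1
--         kept = [b for b in bads if b <= last]
--         if not kept: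
--             if lo <= last:
--                 yield (lo, last + 1)
--             return
--         p = kept[len(kept) // 2]
--         yield from solve([b for b in kept if b < p], lo, p)
--         yield from solve([b for b in kept if b > p], p + 1, hi)
--     yield from solve(list(bad_sectors), available_range[0], available_range[1])
-- ===== Notes on version B (the rewrite author's own statement) =====
-- stated objective: alternative
-- what changed: Replaces A's sort-then-linear-scan with a running accumulator by an unsorted quicksort-style divide and conquer: pick a pivot bad sector, partition the remaining bad sectors around it, and recursively compute the good ranges of the sub-range left of the pivot and of the sub-range right of it; no sort and no carried loop state.
import Mathlib
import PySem

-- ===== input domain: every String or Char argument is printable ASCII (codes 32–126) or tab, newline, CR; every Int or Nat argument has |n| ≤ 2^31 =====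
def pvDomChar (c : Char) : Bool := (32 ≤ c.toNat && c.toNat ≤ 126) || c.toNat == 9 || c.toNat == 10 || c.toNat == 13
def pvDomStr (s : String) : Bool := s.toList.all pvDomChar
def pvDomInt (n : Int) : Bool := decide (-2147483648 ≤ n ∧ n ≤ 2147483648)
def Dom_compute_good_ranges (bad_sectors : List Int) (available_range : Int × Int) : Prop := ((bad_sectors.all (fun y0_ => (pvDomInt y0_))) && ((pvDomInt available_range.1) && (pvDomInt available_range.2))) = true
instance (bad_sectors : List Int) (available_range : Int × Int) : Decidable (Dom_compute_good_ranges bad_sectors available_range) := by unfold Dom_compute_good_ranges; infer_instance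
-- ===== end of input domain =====

-- B replaces A's sort-then-running-accumulator scan by an unsorted quicksort-style
-- divide and conquer (pivot, partition, recurse on the two sub-ranges); alternative
-- decomposition, similar cost.
-- ===== PORT A =====
def goRangesA : List Int → Int → Int → List (Int × Int)
  | [], cur, last => if cur ≤ last then [(cur, last + 1)] else []
  | b :: rest, cur, last =>
    if b > last then (if cur ≤ last then [(cur, last + 1)] else [])
    else (if cur < b then [(cur, b)] else []) ++ goRangesA rest (b + 1) last

def compute_good_ranges (bad_sectors : List Int) (available_range : Int × Int) : List (Int × Int) :=
  goRangesA (PySem.List.sorted (PySem.Set.ofList bad_sectors) (fun x => x) false)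
    available_range.1 (available_range.2 - 1)

-- ===== PORT B =====
-- 'solve' of Source B; the fuel (first argument) only makes the recursion structurally
-- total — it never runs out when fuel > bads.length (proved below in solveB_eq).
def solveB : Nat → List Int → Int → Int → List (Int × Int)
  | 0, _, _, _ => []
  | fuel + 1, bads, lo, hi =>
    let last := hi - 1
    let kept := bads.filter (fun b => b ≤ last)
    if hk : kept = [] then
      if lo ≤ last then [(lo, last + 1)] else []
    else
      let p := kept[kept.length / 2]'(Nat.div_lt_self (List.length_pos_of_ne_nil hk) one_lt_two)
      solveB fuel (kept.filter (fun b => b < p)) lo p ++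
        solveB fuel (kept.filter (fun b => p < b)) (p + 1) hi

def compute_good_ranges_alt (bad_sectors : List Int) (available_range : Int × Int) : List (Int × Int) :=
  solveB (bad_sectors.length + 1) bad_sectors available_range.1 available_range.2

-- ===== PRECONDITION & SPEC =====
def Spec_compute_good_ranges (bad_sectors : List Int) (available_range : Int × Int) (out : List (Int × Int)) : Prop := out = compute_good_ranges_alt bad_sectors available_range
instance (bad_sectors : List Int) (available_range : Int × Int) (out : List (Int × Int)) : Decidable (Spec_compute_good_ranges bad_sectors available_range out) := by unfold Spec_compute_good_ranges; infer_instance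

-- ===== CLAIM (what is proved, stated in full; the proofs are below) =====
def Claim_equal_compute_good_ranges : Prop := ∀ (bad_sectors : List Int) (available_range : Int × Int), Dom_compute_good_ranges bad_sectors available_range → Spec_compute_good_ranges bad_sectors available_range (compute_good_ranges bad_sectors available_range)

-- ===== LEMMAS AND PROOFS =====

-- sorted(set(xs)) with the identity key, as both ports use it
def dsort (xs : List Int) : List Int :=
  PySem.List.sorted (PySem.Set.ofList xs) (fun x => x) false

theorem dsort_pairwise (xs : List Int) : (dsort xs).Pairwise (· < ·) :=
  PySem.List.sorted_ofList_pairwise_lt xs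

theorem mem_dsort {x : Int} {xs : List Int} : x ∈ dsort xs ↔ x ∈ xs := by
  unfold dsort
  rw [PySem.List.mem_sorted, PySem.Set.mem_ofList]

-- splitting A's scan at a pivot p that all of xs is below and all of ys is above
theorem goRangesA_split (xs : List Int) (ys : List Int) (p lo last : Int)
    (hpl : p ≤ last) (hxs : ∀ x ∈ xs, x < p) :
    goRangesA (xs ++ p :: ys) lo last =
      goRangesA xs lo (p - 1) ++ goRangesA ys (p + 1) last := by
  induction xs generalizing lo with
  | nil =>
    simp only [List.nil_append, goRangesA]
    rw [if_neg (by omega : ¬ p > last)]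
    have h1 : lo ≤ p - 1 ↔ lo < p := by omega
    by_cases h : lo < p
    · rw [if_pos h, if_pos (by omega), (by omega : p - 1 + 1 = p)]
    · rw [if_neg h, if_neg (by omega), List.nil_append]
  | cons x rest ih =>
    have hx : x < p := hxs x List.mem_cons_self
    simp only [List.cons_append, goRangesA]
    rw [if_neg (by omega : ¬ x > last), if_neg (by omega : ¬ x > p - 1),
      ih (x + 1) (fun y hy => hxs y (List.mem_cons_of_mem _ hy)), List.append_assoc]

-- elements above last only break the scan: they can be filtered away up front
theorem goRangesA_filter (xs : List Int) (lo last : Int)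
    (hs : xs.Pairwise (· ≤ ·)) :
    goRangesA xs lo last = goRangesA (xs.filter (fun b => b ≤ last)) lo last := by
  induction xs generalizing lo with
  | nil => rfl
  | cons b rest ih =>
    rcases List.pairwise_cons.mp hs with ⟨hb, hrest⟩
    by_cases hbl : b > last
    · have hfr : (b :: rest).filter (fun b => b ≤ last) = [] := by
        apply List.filter_eq_nil_iff.mpr
        intro x hx
        rcases List.mem_cons.mp hx with h | h
        · simp [h]; omega
        · have := hb x h; simp; omega
      rw [hfr]
      simp only [goRangesA, if_pos hbl]
    · rw [not_lt] at hbl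
      simp only [goRangesA, List.filter_cons, decide_eq_true_eq, if_pos hbl, goRangesA]
      rw [if_neg (by omega : ¬ b > last), ih _ hrest, if_neg (by omega : ¬ b > last)]

theorem length_filter_lt {l : List Int} {p : Int} (hp : p ∈ l) {q : Int → Bool}
    (hq : q p = false) : (l.filter q).length < l.length := by
  induction l with
  | nil => cases hp
  | cons a rest ih =>
    rcases List.mem_cons.mp hp with h | h
    · subst h
      rw [List.filter_cons, hq]
      exact Nat.lt_succ_of_le (List.length_filter_le _ _)
    · rw [List.filter_cons]
      by_cases ha : q a = true
      · simp only [ha, List.length_cons]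
        exact Nat.succ_lt_succ (ih h)
      · simp only [eq_false_of_ne_true ha]
        exact Nat.lt_succ_of_lt (ih h)

-- two strictly increasing lists with the same members are equal
theorem eq_of_mem_iff_of_pairwise_lt {l₁ l₂ : List Int}
    (h₁ : l₁.Pairwise (· < ·)) (h₂ : l₂.Pairwise (· < ·))
    (hm : ∀ x, x ∈ l₁ ↔ x ∈ l₂) : l₁ = l₂ := by
  haveI : Std.Antisymm (· < · : Int → Int → Prop) :=
    ⟨fun a b h h' => absurd h' (not_lt.mpr h.le)⟩
  exact List.Perm.eq_of_pairwise' h₁ h₂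
    ((List.perm_ext_iff_of_nodup (h₁.nodup) (h₂.nodup)).mpr hm)

-- the heart: B's divide and conquer computes A's scan of sorted(set(bads))
theorem solveB_eq (fuel : Nat) : ∀ (bads : List Int) (lo hi : Int),
    bads.length < fuel →
    solveB fuel bads lo hi = goRangesA (dsort bads) lo (hi - 1) := by
  induction fuel with
  | zero => intro bads lo hi h; omega
  | succ n ih =>
    intro bads lo hi hlen
    show (if hk : bads.filter (fun b => b ≤ hi - 1) = [] then _ else _) = _
    rw [goRangesA_filter (dsort bads) lo (hi - 1)
      ((dsort_pairwise bads).imp (fun h => le_of_lt h))]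
    by_cases hk : bads.filter (fun b => b ≤ hi - 1) = []
    · rw [dif_pos hk]
      have hfe : (dsort bads).filter (fun b => b ≤ hi - 1) = [] := by
        apply List.filter_eq_nil_iff.mpr
        intro x hx hxle
        exact List.filter_eq_nil_iff.mp hk x (mem_dsort.mp hx) hxle
      rw [hfe]; rfl
    · rw [dif_neg hk]
      set kept := bads.filter (fun b => b ≤ hi - 1) with hkept
      set p := kept[kept.length / 2]'(Nat.div_lt_self (List.length_pos_of_ne_nil hk) one_lt_two) with hpdef
      have hpmem : p ∈ kept := List.getElem_mem _
      have hpbad : p ∈ bads := (List.mem_filter.mp hpmem).1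
      have hple : p ≤ hi - 1 := by
        have := (List.mem_filter.mp hpmem).2; simpa using this
      have hLlen : (kept.filter (fun b => b < p)).length < n := by
        have h1 : (kept.filter (fun b => b < p)).length < kept.length :=
          length_filter_lt hpmem (by simp)
        have h2 : kept.length ≤ bads.length := List.length_filter_le _ _
        omega
      have hRlen : (kept.filter (fun b => p < b)).length < n := by
        have h1 : (kept.filter (fun b => p < b)).length < kept.length :=
          length_filter_lt hpmem (by simp)
        have h2 : kept.length ≤ bads.length := List.length_filter_le _ _
        omega
      rw [ih _ lo p hLlen, ih _ (p + 1) hi hRlen]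
      have hsplit : (dsort bads).filter (fun b => b ≤ hi - 1) =
          dsort (kept.filter (fun b => b < p)) ++ p :: dsort (kept.filter (fun b => p < b)) := by
        apply eq_of_mem_iff_of_pairwise_lt
        · exact (dsort_pairwise bads).filter _
        · rw [List.pairwise_append]
          refine ⟨dsort_pairwise _, List.pairwise_cons.mpr ⟨?_, dsort_pairwise _⟩, ?_⟩
          · intro y hy
            have := (List.mem_filter.mp (mem_dsort.mp hy)).2
            simpa using this
          · intro x hx y hy
            have hxp : x < p := by
              have := (List.mem_filter.mp (mem_dsort.mp hx)).2; simpa using this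
            rcases List.mem_cons.mp hy with h | h
            · omega
            · have hpy : p < y := by
                have := (List.mem_filter.mp (mem_dsort.mp h)).2; simpa using this
              omega
        · intro x
          simp only [List.mem_filter, mem_dsort, List.mem_append, List.mem_cons,
            decide_eq_true_eq, hkept]
          constructor
          · rintro ⟨hx, hxle⟩
            rcases lt_trichotomy x p with h | h | h
            · exact Or.inl ⟨⟨hx, by simpa using hxle⟩, by simpa using h⟩
            · exact Or.inr (Or.inl h)
            · exact Or.inr (Or.inr ⟨⟨hx, by simpa using hxle⟩, by simpa using h⟩)
          · rintro (⟨⟨hx, hxle⟩, _⟩ | h | ⟨⟨hx, hxle⟩, _⟩)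
            · exact ⟨hx, hxle⟩
            · subst h; exact ⟨hpbad, by simpa using hple⟩
            · exact ⟨hx, hxle⟩
      rw [hsplit]
      exact (goRangesA_split _ _ _ _ _ hple (fun x hx => by
        have := (List.mem_filter.mp (mem_dsort.mp hx)).2
        simpa using this)).symm

-- ===== VERDICT (by name: the statement is the Claim_ definition above) =====
theorem compute_good_ranges_spec : Claim_equal_compute_good_ranges := by
  intro bads ar _
  unfold Spec_compute_good_ranges compute_good_ranges compute_good_ranges_alt
  rw [solveB_eq (bads.length + 1) bads ar.1 ar.2 (Nat.lt_succ_self _)]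
  rfl
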